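-- pv_equiv track=rewrite | github.com/axd8911/Leetcode | mianshi_prep/Quora_prep/phone/Print_3_Base_Number.py | solution
-- ===== SOURCE A (Python) =====
-- def solution(num):
--     n = 1
--     curr = num-1
--     digits = 1
--     while curr>=3**n:
--         curr -= 3**n
--         n+=1
--         digits += 1
--     res = []
--     #num = curr
--     while curr>0:
--         res.append(str(curr%3))
--         curr//=3
--     res = res[::-1]
--     res = ['0']*(digits-len(res)) + res
--     return ''.join(res)
-- ===== SOURCE B (Python) =====
-- def solution(num):
--     # index within the buckets; clamped to 0 so that num <= 0 yields the
--     # all-zero one-digit encoding, like the reference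
--     curr = max(num - 1, 0)
--     digits = 1
--     p = 3
--     while curr >= p:
--         curr -= p
--         p *= 3
--         digits += 1
--     # emit most-significant digit first: no reverse, no padding step
--     out = []
--     for i in range(digits - 1, -1, -1):
--         out.append(str((curr // 3 ** i) % 3))
--     return ''.join(out)
-- ===== Notes on version B (the rewrite author's own statement) =====
-- stated objective: alternative
-- what changed: B keeps the bucket-finding subtraction loop (with the power maintained incrementally) but then emits the within-bucket index most-significant-digit first by dividing by successive powers of the base, so the digit-collect loop, the reverse and the separate zero-padding step of A all disappear.
import Mathlib
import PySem

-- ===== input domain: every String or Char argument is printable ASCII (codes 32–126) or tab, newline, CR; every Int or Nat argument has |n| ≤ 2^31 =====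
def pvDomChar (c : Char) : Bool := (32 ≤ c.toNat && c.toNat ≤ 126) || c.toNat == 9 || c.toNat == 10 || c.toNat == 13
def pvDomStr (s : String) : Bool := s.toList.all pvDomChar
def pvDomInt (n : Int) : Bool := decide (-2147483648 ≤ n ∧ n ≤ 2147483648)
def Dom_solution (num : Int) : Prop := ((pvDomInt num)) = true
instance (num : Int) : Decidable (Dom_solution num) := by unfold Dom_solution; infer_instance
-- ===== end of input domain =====

-- B restructures the output phase: it emits the within-bucket index most-significant
-- digit first, removing A's digit-collect loop, reverse and padding steps (objective: alternative).

-- ===== PORT A =====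
-- first while loop of A: 'while curr >= 3**n: curr -= 3**n; n += 1; digits += 1'
-- (n starts at 1 and only grows, so 3**n is ported as (3:Int)^n.toNat, exact for n ≥ 0)
def solLoopA (curr n digits : Int) : Int × Int :=
  if _h : curr ≥ (3 : Int) ^ n.toNat then solLoopA (curr - (3 : Int) ^ n.toNat) (n + 1) (digits + 1)
  else (curr, digits)
termination_by curr.toNat
decreasing_by
  have hp : (0 : Int) < (3 : Int) ^ n.toNat := pow_pos (by norm_num) _
  omega

-- second while loop of A: 'while curr > 0: res.append(str(curr%3)); curr //= 3'
def solLoopA2 (curr : Int) (res : List String) : List String :=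
  if _h : curr > 0 then
    solLoopA2 (PySem.Int.floordiv curr 3) (res ++ [PySem.Int.toStr (PySem.Int.mod curr 3)])
  else res
termination_by curr.toNat
decreasing_by
  have h3 : (0 : Int) < 3 := by norm_num
  have := PySem.Int.floordiv_eq_ediv_of_pos (a := curr) h3
  omega

def solution (num : Int) : String :=
  let p := solLoopA (num - 1) 1 1
  let res := solLoopA2 p.1 []
  let res := (PySem.List.slice? res none none (-1)).getD []   -- res[::-1]; step -1 ≠ 0 so never none
  let res := List.replicate (p.2 - (res.length : Int)).toNat "0" ++ res  -- ['0']*(digits-len(res)) + res (negative count → [])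
  PySem.Str.join "" res

-- ===== PORT B =====
-- B's while loop: 'while curr >= p: curr -= p; p *= 3; digits += 1'
-- (the '0 < p' conjunct only makes the recursion total; at every call site p is a positive power of 3)
def solLoopB (curr p digits : Int) : Int × Int :=
  if _h : 0 < p ∧ curr ≥ p then solLoopB (curr - p) (p * 3) (digits + 1)
  else (curr, digits)
termination_by curr.toNat
decreasing_by omega

def solution_alt (num : Int) : String :=
  let curr := max (num - 1) 0
  let q := solLoopB curr 3 1
  let out := (PySem.List.pyRange (q.2 - 1) (-1) (-1)).foldl
    (fun acc i => acc ++ [PySem.Int.toStr (PySem.Int.mod (PySem.Int.floordiv q.1 ((3 : Int) ^ i.toNat)) 3)]) []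
  PySem.Str.join "" out

-- ===== PRECONDITION & SPEC =====
def Spec_solution (num : Int) (out : String) : Prop := out = solution_alt num
instance (num : Int) (out : String) : Decidable (Spec_solution num out) := by unfold Spec_solution; infer_instance

-- ===== CLAIM (what is proved, stated in full; the proofs are below) =====
def Claim_equal_solution : Prop := ∀ (num : Int), Dom_solution num → Spec_solution num (solution num)

-- ===== LEMMAS AND PROOFS =====

-- the Nat-level least-significant-digit list both second halves reduce to
def lsbN (m : Nat) : List String :=
  if _h : 0 < m then PySem.Int.toStr ((m % 3 : Nat) : Int) :: lsbN (m / 3) else []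
termination_by m
decreasing_by exact Nat.div_lt_self (by omega) (by omega)

lemma lsbN_zero : lsbN 0 = [] := by
  rw [lsbN.eq_def, dif_neg (by omega)]

lemma lsbN_pos (m : Nat) (h : 0 < m) :
    lsbN m = PySem.Int.toStr ((m % 3 : Nat) : Int) :: lsbN (m / 3) := by
  rw [lsbN.eq_def, dif_pos h]

lemma loopA2_stop (curr : Int) (res : List String) (h : ¬ curr > 0) :
    solLoopA2 curr res = res := by
  rw [solLoopA2.eq_def, dif_neg h]

lemma loopA2_step (curr : Int) (res : List String) (h : curr > 0) :
    solLoopA2 curr res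
      = solLoopA2 (PySem.Int.floordiv curr 3) (res ++ [PySem.Int.toStr (PySem.Int.mod curr 3)]) := by
  rw [solLoopA2.eq_def, dif_pos h]

-- A's second loop only ever appends: the accumulator factors out
lemma loopA2_acc : ∀ (k : Nat) (curr : Int) (res₁ res₂ : List String), curr.toNat ≤ k →
    solLoopA2 curr (res₁ ++ res₂) = res₁ ++ solLoopA2 curr res₂ := by
  intro k
  induction k with
  | zero =>
    intro curr res₁ res₂ hk
    have h : ¬ curr > 0 := by omega
    rw [loopA2_stop _ _ h, loopA2_stop _ _ h]
  | succ k ih =>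
    intro curr res₁ res₂ hk
    by_cases h : curr > 0
    · rw [loopA2_step _ _ h, loopA2_step _ _ h, List.append_assoc]
      have hd : (PySem.Int.floordiv curr 3).toNat ≤ k := by
        rw [PySem.Int.floordiv_eq_ediv_of_pos (by norm_num : (0:Int) < 3)]
        omega
      exact ih _ _ _ hd
    · rw [loopA2_stop _ _ h, loopA2_stop _ _ h]

lemma loopA2_eq_lsbN : ∀ (k m : Nat), m ≤ k → solLoopA2 (m : Int) [] = lsbN m := by
  intro k
  induction k with
  | zero =>
    intro m hm
    have h0 : m = 0 := by omega
    subst h0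
    rw [loopA2_stop _ _ (by omega), lsbN_zero]
  | succ k ih =>
    intro m hm
    by_cases h0 : 0 < m
    · rw [loopA2_step _ _ (by exact_mod_cast h0)]
      have h1 : PySem.Int.floordiv (m : Int) 3 = ((m / 3 : Nat) : Int) := by
        exact_mod_cast PySem.Int.floordiv_natCast m 3
      have h2 : PySem.Int.mod (m : Int) 3 = ((m % 3 : Nat) : Int) := by
        exact_mod_cast PySem.Int.mod_natCast m 3
      rw [h1, h2, List.nil_append]
      have hsplit :
          [PySem.Int.toStr ((m % 3 : Nat) : Int)]
            = [PySem.Int.toStr ((m % 3 : Nat) : Int)] ++ ([] : List String) := by simp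
      rw [hsplit, loopA2_acc (m / 3) _ _ _ (by simp), ih (m / 3) (by omega), lsbN_pos m h0]
      rfl
    · have h0' : m = 0 := by omega
      subst h0'
      rw [loopA2_stop _ _ (by omega), lsbN_zero]

-- the first loops of A and B run in lockstep (B carries the power incrementally)
lemma loopAB : ∀ (k : Nat) (curr n digits : Int), curr.toNat ≤ k → 0 ≤ n →
    solLoopA curr n digits = solLoopB curr ((3 : Int) ^ n.toNat) digits := by
  intro k
  induction k with
  | zero =>
    intro curr n digits hk hn
    have hp : (0 : Int) < (3 : Int) ^ n.toNat := pow_pos (by norm_num) _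
    rw [solLoopA.eq_def, solLoopB.eq_def, dif_neg (by omega), dif_neg (by omega)]
  | succ k ih =>
    intro curr n digits hk hn
    have hp : (0 : Int) < (3 : Int) ^ n.toNat := pow_pos (by norm_num) _
    by_cases h : curr ≥ (3 : Int) ^ n.toNat
    · rw [solLoopA.eq_def, solLoopB.eq_def, dif_pos h, dif_pos ⟨hp, h⟩]
      have hpow : (3 : Int) ^ n.toNat * 3 = (3 : Int) ^ (n + 1).toNat := by
        have he : (n + 1).toNat = n.toNat + 1 := by omega
        rw [he, pow_succ]
      rw [hpow]
      exact ih _ _ _ (by omega) (by omega)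
    · rw [solLoopA.eq_def, solLoopB.eq_def, dif_neg h, dif_neg (by omega)]

-- postcondition of the shared loop: the residual index fits in 'digits' base-3 digits
lemma loopB_inv : ∀ (k : Nat) (curr p digits : Int), curr.toNat ≤ k → 0 ≤ curr → 1 ≤ digits →
    p = (3 : Int) ^ digits.toNat →
    0 ≤ (solLoopB curr p digits).1 ∧
      (solLoopB curr p digits).1 < (3 : Int) ^ (solLoopB curr p digits).2.toNat ∧
      1 ≤ (solLoopB curr p digits).2 := by
  intro k
  induction k with
  | zero =>
    intro curr p digits hk hc hd hp
    have hpos : (0 : Int) < p := by rw [hp]; exact pow_pos (by norm_num) _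
    rw [solLoopB.eq_def, dif_neg (by omega)]
    exact ⟨hc, by simp only; omega, hd⟩
  | succ k ih =>
    intro curr p digits hk hc hd hp
    have hpos : (0 : Int) < p := by rw [hp]; exact pow_pos (by norm_num) _
    by_cases h : curr ≥ p
    · rw [solLoopB.eq_def, dif_pos ⟨hpos, h⟩]
      have hpow : p * 3 = (3 : Int) ^ (digits + 1).toNat := by
        have he : (digits + 1).toNat = digits.toNat + 1 := by omega
        rw [he, pow_succ, hp]
      exact ih _ _ _ (by omega) (by omega) (by omega) hpow
    · rw [solLoopB.eq_def, dif_neg (by omega)]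
      exact ⟨hc, by simp only; omega, hd⟩

-- the base-3 digits of m (< 3^k), least significant first, padded to k with '0'
lemma keyL : ∀ (k m : Nat), m < 3 ^ k →
    (List.range k).map (fun j => PySem.Int.toStr ((m / 3 ^ j % 3 : Nat) : Int))
      = lsbN m ++ List.replicate (k - (lsbN m).length) "0" := by
  intro k
  induction k with
  | zero =>
    intro m hm
    have h0 : m = 0 := by omega
    subst h0
    rw [lsbN_zero]
    simp
  | succ k ih =>
    intro m hm
    rw [List.range_succ_eq_map, List.map_cons, List.map_map]
    have hfun : ((fun j => PySem.Int.toStr ((m / 3 ^ j % 3 : Nat) : Int)) ∘ Nat.succ)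
        = fun j => PySem.Int.toStr ((m / 3 / 3 ^ j % 3 : Nat) : Int) := by
      funext j
      simp only [Function.comp_apply]
      rw [Nat.div_div_eq_div_mul, ← pow_succ']
    rw [hfun]
    have hm3 : m / 3 < 3 ^ k := by
      rw [Nat.div_lt_iff_lt_mul (by norm_num : 0 < 3), ← pow_succ]
      exact hm
    rw [ih (m / 3) hm3]
    by_cases h0 : 0 < m
    · rw [lsbN_pos m h0]
      simp only [pow_zero, Nat.div_one, List.cons_append, List.length_cons]
      have he : k + 1 - ((lsbN (m / 3)).length + 1) = k - (lsbN (m / 3)).length := by omega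
      rw [he]
    · have h0' : m = 0 := by omega
      subst h0'
      rw [lsbN_zero]
      simp only [Nat.zero_mod, pow_zero, Nat.div_one, List.nil_append,
        List.length_nil, Nat.sub_zero]
      rw [List.replicate_succ]
      congr 1
lemma rev_map_range {α : Type} (h : Nat → α) (k : Nat) :
    ((List.range k).map h).reverse = (List.range k).map (fun j => h (k - 1 - j)) := by
  apply List.ext_getElem
  · simp
  · intro i h1 h2
    simp [List.getElem_reverse]

lemma foldl_app {α β : Type} (f : α → β) : ∀ (l : List α) (acc : List β),
    l.foldl (fun a i => a ++ [f i]) acc = acc ++ l.map f := by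
  intro l
  induction l with
  | nil => simp
  | cons x xs ih => intro acc; simp [ih]

lemma solution_le_zero (num : Int) (h : num ≤ 0) : solution num = "0" := by
  have hA : solLoopA (num - 1) 1 1 = (num - 1, 1) := by
    rw [solLoopA.eq_def, dif_neg]
    simp only [Int.toNat_one, pow_one]
    omega
  have hA2 : solLoopA2 (num - 1) [] = [] := loopA2_stop _ _ (by omega)
  simp only [solution, hA, hA2]
  decide

lemma solution_alt_le_zero (num : Int) (h : num ≤ 0) : solution_alt num = "0" := by
  simp only [solution_alt]
  rw [max_eq_right (show num - 1 ≤ 0 by omega)]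
  rw [solLoopB.eq_def, dif_neg (by omega)]
  decide

-- ===== VERDICT (by name: the statement is the Claim_ definition above) =====
theorem solution_spec : Claim_equal_solution := by
  intro num _
  unfold Spec_solution
  by_cases hz : num ≤ 0
  · rw [solution_le_zero num hz, solution_alt_le_zero num hz]
  · rw [not_le] at hz
    have hc0 : (0 : Int) ≤ num - 1 := by omega
    have h31 : (3 : Int) ^ ((1 : Int).toNat) = 3 := by norm_num
    have hAB : solLoopA (num - 1) 1 1 = solLoopB (num - 1) 3 1 := by
      have := loopAB (num - 1).toNat (num - 1) 1 1 le_rfl (by norm_num)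
      rwa [h31] at this
    have hinv := loopB_inv (num - 1).toNat (num - 1) 3 1 le_rfl hc0 le_rfl h31.symm
    obtain ⟨h1, h2, h3⟩ := hinv
    set q := solLoopB (num - 1) 3 1 with hqdef
    set m := q.1.toNat with hmdef
    set k := q.2.toNat with hkdef
    have hq1 : q.1 = (m : Int) := (Int.toNat_of_nonneg h1).symm
    have hq2 : q.2 = (k : Int) := (Int.toNat_of_nonneg (by omega)).symm
    have hm : m < 3 ^ k := by
      rw [hq1] at h2; exact_mod_cast h2
    have hA2 : solLoopA2 ((m : Nat) : Int) [] = lsbN m := loopA2_eq_lsbN m m le_rfl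
    have hkey := keyL k m hm
    simp only [solution, solution_alt]
    rw [hAB, max_eq_left hc0, ← hqdef, hq1, hq2, hA2, PySem.List.slice?_none_none_neg_one,
      Option.getD_some, List.length_reverse]
    have hrep : ((k : Int) - ((lsbN m).length : Int)).toNat = k - (lsbN m).length := by omega
    rw [hrep]
    congr 1
    -- A's padded-and-reversed list is the MSB-first digit list
    have hAlist : List.replicate (k - (lsbN m).length) "0" ++ (lsbN m).reverse
        = ((List.range k).map (fun j => PySem.Int.toStr ((m / 3 ^ j % 3 : Nat) : Int))).reverse := by
      rw [hkey, List.reverse_append, List.reverse_replicate]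
    rw [hAlist, rev_map_range]
    -- B's fold over the countdown range is the same map
    rw [foldl_app (f := fun i : Int =>
      PySem.Int.toStr (PySem.Int.mod (PySem.Int.floordiv (m : Int) ((3 : Int) ^ i.toNat)) 3))]
    rw [List.nil_append, PySem.List.pyRange_neg_one]
    have hkk : ((k : Int) - 1 - (-1)).toNat = k := by omega
    rw [hkk, List.map_map]
    apply List.map_congr_left
    intro t ht
    rw [List.mem_range] at ht
    simp only [Function.comp_apply]
    have e1 : ((k : Int) - 1 - (t : Int)).toNat = k - 1 - t := by omega
    rw [e1]
    have e2 : (3 : Int) ^ (k - 1 - t) = ((3 ^ (k - 1 - t) : Nat) : Int) := by push_cast; ring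
    rw [e2, PySem.Int.floordiv_natCast]
    have e3 : PySem.Int.mod ((m / 3 ^ (k - 1 - t) : Nat) : Int) 3
        = ((m / 3 ^ (k - 1 - t) % 3 : Nat) : Int) := by
      exact_mod_cast PySem.Int.mod_natCast _ 3
    rw [e3]
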